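-- pv_equiv track=rewrite | github.com/Mikyas1/true-buyers | app.py | price_str
-- ===== SOURCE A (Python) =====
-- def price_str(price):
-- 	price = str(price)
-- 	birr = price.split('.')[0]
-- 	cent = price.split('.')[1]
--
-- 	if len(cent) > 2:
-- 		cent = cent[:2]
-- 	elif len(cent) == 1:
-- 		cent = cent + '0'
--
-- 	len_birr = len(birr)
-- 	list_birr = list(birr)
-- 	comm_birr = int((len(birr)-1)/3)
--
-- 	for x in range(comm_birr):
-- 		comm_place = len_birr - (x + 1) * 3
-- 		list_birr.insert(comm_place, ',')
-- 		birr = ''.join(list_birr)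
--
-- 	return birr + '.' + cent
-- ===== SOURCE B (Python) =====
-- def price_str(price):
-- 	price = str(price)
-- 	parts = price.split('.')
-- 	birr = parts[0]
-- 	cent = (parts[1] + '0' if len(parts[1]) == 1 else parts[1])[:2]
-- 	chunks = []
-- 	i = len(birr)
-- 	while i > 0:
-- 		chunks.append(birr[max(0, i - 3):i])
-- 		i -= 3
-- 	return ','.join(reversed(chunks)) + '.' + cent
-- ===== Notes on version B (the rewrite author's own statement) =====
-- stated objective: alternative
-- what changed: Replaces A's list.insert comma loop (repeatedly splicing ',' into a char list at computed positions) with a right-to-left chunking pass that slices the integer part into 3-character groups and joins them with ','; the cent branch is folded into one pad-then-truncate expression.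
import Mathlib
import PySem

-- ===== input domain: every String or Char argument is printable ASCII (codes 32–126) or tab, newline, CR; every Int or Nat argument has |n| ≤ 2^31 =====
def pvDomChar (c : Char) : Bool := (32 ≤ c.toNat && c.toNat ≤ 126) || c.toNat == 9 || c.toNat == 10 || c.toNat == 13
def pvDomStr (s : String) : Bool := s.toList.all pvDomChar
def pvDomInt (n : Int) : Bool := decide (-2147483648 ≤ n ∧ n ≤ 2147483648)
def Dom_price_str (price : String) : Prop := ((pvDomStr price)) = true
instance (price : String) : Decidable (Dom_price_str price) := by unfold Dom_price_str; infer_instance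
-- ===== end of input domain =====

-- B replaces A's comma-insertion loop by right-to-left 3-character chunking + join (alternative decomposition, same results).

-- ===== PORT A =====
-- price = str(price) is the identity on a String argument.
def price_str (price : String) : String :=
  let parts := PySem.Chars.splitOn price.toList ['.']
  let birr := (PySem.List.pyGet? parts 0).getD []   -- split never returns []: [0] cannot raise
  let cent0 := (PySem.List.pyGet? parts 1).getD []  -- none = IndexError (no '.'), excluded by Pre_
  let cent := if cent0.length > 2 then PySem.List.slice cent0 none (some 2)
              else if cent0.length = 1 then cent0 ++ ['0'] else cent0
  let lenBirr := birr.length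
  -- int((len(birr)-1)/3): exact here — for len = 0 Python yields 0, as Nat subtraction/division does
  let comm := (lenBirr - 1) / 3
  let birr' := (List.range comm).foldl
      (fun st (x : Nat) => PySem.List.insert st ((lenBirr : Int) - ((x : Int) + 1) * 3) ',') birr
  String.ofList (birr' ++ '.' :: cent)

-- ===== PORT B =====
-- the while loop of Source B: birr[max(0, i-3):i] collected right to left (Nat subtraction IS max(0, i-3))
def pvChunks (birr : List Char) (i : Nat) : List (List Char) :=
  if _h : i = 0 then []
  else PySem.List.slice birr (some ((i - 3 : Nat) : Int)) (some (i : Int)) :: pvChunks birr (i - 3)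
  termination_by i
  decreasing_by omega

def price_str_alt (price : String) : String :=
  let parts := PySem.Chars.splitOn price.toList ['.']
  let birr := (PySem.List.pyGet? parts 0).getD []
  let p1 := (PySem.List.pyGet? parts 1).getD []     -- none = IndexError (no '.'), excluded by Pre_
  let cent := PySem.List.slice (if p1.length = 1 then p1 ++ ['0'] else p1) none (some 2)
  String.ofList (PySem.Chars.join [','] (pvChunks birr birr.length).reverse ++ '.' :: cent)

-- ===== PRECONDITION & SPEC =====
-- Pre_: price must contain a '.', otherwise price.split('.')[1] raises IndexError in A (and in B).
def Pre_price_str (price : String) : Prop := PySem.Str.isIn "." price = true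
instance (price : String) : Decidable (Pre_price_str price) := by unfold Pre_price_str; infer_instance
def pvWitness_price_str : String := "1234.5"
def Spec_price_str (price : String) (out : String) : Prop := out = price_str_alt price
instance (price : String) (out : String) : Decidable (Spec_price_str price out) := by unfold Spec_price_str; infer_instance

-- ===== CLAIM (what is proved, stated in full; the proofs are below) =====
def Claim_equal_price_str : Prop := ∀ (price : String), Dom_price_str price → Pre_price_str price → Spec_price_str price (price_str price)

-- ===== LEMMAS AND PROOFS =====

-- the two cent computations agree
theorem pvCentEq (c : List Char) :
    (if c.length > 2 then PySem.List.slice c none (some 2)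
     else if c.length = 1 then c ++ ['0'] else c)
    = PySem.List.slice (if c.length = 1 then c ++ ['0'] else c) none (some 2) := by
  by_cases h1 : c.length = 1
  · simp only [h1, if_true, show ¬ (1 > 2) by omega, if_false]
    rw [PySem.List.slice_to _ (by norm_num), List.take_of_length_le (by simp [h1])]
  · by_cases h2 : c.length > 2
    · simp only [h1, if_false, h2, if_true]
    · simp only [h1, if_false, h2, if_false]
      rw [PySem.List.slice_to _ (by norm_num), List.take_of_length_le (by omega)]

-- inserting at a position inside the prefix commutes with ++
theorem pvInsertAppend (A s : List Char) (k : Nat) (h : k ≤ A.length) (c : Char) :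
    PySem.List.insert (A ++ s) (k : Int) c = PySem.List.insert A (k : Int) c ++ s := by
  rw [PySem.List.insert_natCast _ _ _ (by simp; omega), PySem.List.insert_natCast _ _ _ h,
      List.take_append_of_le_length h, List.drop_append_of_le_length h]
  simp

-- length of A's insert fold
theorem pvFoldLen (m : Nat) (p : List Char) (pos : Nat → Int) :
    ((List.range m).foldl (fun st (x : Nat) => PySem.List.insert st (pos x) ',') p).length
      = p.length + m := by
  induction m generalizing p with
  | zero => simp
  | succ m ih =>
      rw [List.range_succ, List.foldl_append]
      simp [PySem.List.length_insert, ih]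
      omega

-- the insert fold only touches the prefix
theorem pvFoldPrefix (m : Nat) (p s : List Char) (h : 3 * m ≤ p.length) :
    (List.range m).foldl (fun st (x : Nat) => PySem.List.insert st ((p.length : Int) - ((x : Int) + 1) * 3) ',') (p ++ s)
    = ((List.range m).foldl (fun st (x : Nat) => PySem.List.insert st ((p.length : Int) - ((x : Int) + 1) * 3) ',') p) ++ s := by
  induction m with
  | zero => simp
  | succ m ih =>
      rw [List.range_succ, List.foldl_append, List.foldl_append, ih (by omega)]
      simp only [List.foldl_cons, List.foldl_nil]
      have hcast : ((p.length : Int) - ((m : Int) + 1) * 3) = ((p.length - 3 * (m + 1) : Nat) : Int) := by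
        omega
      rw [hcast]
      exact pvInsertAppend _ _ _ (by rw [pvFoldLen]; omega) _

-- chunking only reads the first k characters
theorem pvChunksTake (l : List Char) (k : Nat) : ∀ i, i ≤ k → pvChunks l i = pvChunks (l.take k) i := by
  intro i
  induction i using Nat.strong_induction_on with
  | _ i ih =>
    intro hik
    by_cases h0 : i = 0
    · subst h0
      simp [pvChunks]
    · conv_lhs => rw [pvChunks]
      conv_rhs => rw [pvChunks]
      rw [dif_neg h0, dif_neg h0, PySem.List.slice_natCast, PySem.List.slice_natCast,
        List.drop_take, List.take_take, ih (i - 3) (by omega) (by omega)]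
      rw [Nat.min_eq_left (by omega)]

-- join over a snoc
theorem pvJoinSnoc (xs : List (List Char)) (y : List Char) (h : xs ≠ []) :
    PySem.Chars.join [','] (xs ++ [y]) = PySem.Chars.join [','] xs ++ ',' :: y := by
  induction xs with
  | nil => exact absurd rfl h
  | cons a t ih =>
      cases t with
      | nil => simp [PySem.Chars.join_cons_cons, PySem.Chars.join_singleton]
      | cons b t' =>
          have hih := ih (by simp)
          rw [List.cons_append] at hih
          rw [List.cons_append, List.cons_append, PySem.Chars.join_cons_cons, hih,
            PySem.Chars.join_cons_cons]
          simp

-- MAIN: A's comma-insertion loop equals B's chunk-and-join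
theorem pvMain : ∀ n (l : List Char), l.length = n →
    (List.range ((n - 1) / 3)).foldl
        (fun st (x : Nat) => PySem.List.insert st ((n : Int) - ((x : Int) + 1) * 3) ',') l
    = PySem.Chars.join [','] (pvChunks l n).reverse := by
  intro n
  induction n using Nat.strong_induction_on with
  | _ n ih =>
    intro l hl
    by_cases hn : n ≤ 3
    · have hc : (n - 1) / 3 = 0 := by omega
      rw [hc]
      simp only [List.range_zero, List.foldl_nil]
      by_cases h0 : n = 0
      · subst h0
        rw [pvChunks, dif_pos rfl]
        simp [PySem.Chars.join_nil, List.length_eq_zero_iff.mp hl]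
      · have h3 : n - 3 = 0 := by omega
        rw [pvChunks, dif_neg h0, h3, pvChunks, dif_pos rfl, PySem.List.slice_natCast]
        simp only [List.reverse_cons, List.reverse_nil, List.nil_append,
          PySem.Chars.join_singleton, List.drop_zero, Nat.sub_zero]
        rw [List.take_of_length_le (le_of_eq hl)]
    · -- n ≥ 4
      have hc : (n - 1) / 3 = ((n - 3) - 1) / 3 + 1 := by omega
      rw [hc, List.range_succ_eq_map, List.foldl_cons, List.foldl_map]
      have hins : PySem.List.insert l ((n : Int) - (((0 : Nat) : Int) + 1) * 3) ','
          = l.take (n - 3) ++ ',' :: l.drop (n - 3) := by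
        rw [show ((n : Int) - (((0 : Nat) : Int) + 1) * 3) = ((n - 3 : Nat) : Int) by push_cast; omega,
          PySem.List.insert_natCast _ _ _ (by omega)]
      rw [hins]
      set p := l.take (n - 3) with hp
      have hplen : p.length = n - 3 := by rw [hp, List.length_take]; omega
      have hfun : (fun (st : List Char) (x : Nat) =>
            PySem.List.insert st ((n : Int) - (((Nat.succ x : Nat) : Int) + 1) * 3) ',')
          = (fun st (x : Nat) => PySem.List.insert st ((p.length : Int) - ((x : Int) + 1) * 3) ',') := by
        funext st x
        congr 1
        rw [hplen]
        push_cast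
        omega
      rw [hfun, pvFoldPrefix _ _ _ (by omega)]
      have hIH := ih (n - 3) (by omega) p hplen
      rw [hplen, hIH]
      -- now the RHS
      conv_rhs => rw [pvChunks]
      rw [dif_neg (show ¬ n = 0 by omega), PySem.List.slice_natCast,
        pvChunksTake l (n - 3) (n - 3) (le_refl _), ← hp, List.reverse_cons]
      have hdrop : (l.drop (n - 3)).take (n - (n - 3)) = l.drop (n - 3) := by
        rw [List.take_of_length_le]
        rw [List.length_drop]
        omega
      rw [hdrop, pvJoinSnoc]
      intro hc0
      have h2 : pvChunks p (n - 3) = [] := by simpa using congrArg List.reverse hc0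
      rw [pvChunks, dif_neg (show ¬ (n - 3) = 0 by omega)] at h2
      exact (List.cons_ne_nil _ _) h2

-- ===== VERDICT (by name: the statement is the Claim_ definition above) =====
theorem price_str_spec : Claim_equal_price_str := by
  intro price _ _
  unfold Spec_price_str price_str price_str_alt
  simp only []
  rw [pvCentEq, pvMain _ _ rfl]
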